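-- pv_equiv track=rewrite | github.com/Yyds2606969228/keil2Cmake | src/keil2cmake/tinyml/backends/c/ops/matmul_common.py | _broadcast_batch_strides
-- ===== SOURCE A (Python) =====
-- def _full_row_major_strides(shape: list[int]) -> list[int]:
--     rank = len(shape)
--     strides = [0] * rank
--     stride = 1
--     for axis in range(rank - 1, -1, -1):
--         dim = int(shape[axis])
--         if dim <= 0:
--             raise ValueError("MatMul requires known positive dimensions.")
--         strides[axis] = stride
--         stride *= dim
--     return strides
--
-- def _broadcast_batch_strides(in_shape: list[int], out_batch_shape: list[int], op_name: str) -> list[int]: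
--     in_batch = [int(v) for v in in_shape[:-2]]
--     in_rank = len(in_batch)
--     out_rank = len(out_batch_shape)
--     if in_rank > out_rank:
--         raise ValueError(f"{op_name} batch rank mismatch.")
--     full_strides = _full_row_major_strides([int(v) for v in in_shape])
--     in_batch_strides = full_strides[:in_rank]
--     pad = out_rank - in_rank
--     out: list[int] = []
--     for axis in range(out_rank):
--         out_dim = int(out_batch_shape[axis])
--         if out_dim <= 0:
--             raise ValueError(f"{op_name} requires known positive dimensions.")
--         if axis < pad:
--             in_dim = 1
--             stride = 0
--         else:
--             src_axis = axis - pad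
--             in_dim = int(in_batch[src_axis])
--             stride = int(in_batch_strides[src_axis])
--         if in_dim == out_dim:
--             out.append(stride)
--         elif in_dim == 1:
--             out.append(0)
--         else:
--             raise ValueError(f"{op_name} batch dimensions are not broadcast-compatible.")
--     return out
-- ===== SOURCE B (Python) =====
-- def _broadcast_batch_strides(in_shape: list[int], out_batch_shape: list[int], op_name: str) -> list[int]:
--     in_batch = [int(v) for v in in_shape[:-2]]
--     if len(in_batch) > len(out_batch_shape):
--         raise ValueError(f"{op_name} batch rank mismatch.")
--     for v in in_shape:
--         if int(v) <= 0:
--             raise ValueError("MatMul requires known positive dimensions.")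
--     base = 1
--     for v in in_shape[-2:]:
--         base *= int(v)
--     res: list[int] = []
--     acc = base
--     i = len(in_batch) - 1
--     for axis in range(len(out_batch_shape) - 1, -1, -1):
--         out_dim = int(out_batch_shape[axis])
--         if out_dim <= 0:
--             raise ValueError(f"{op_name} requires known positive dimensions.")
--         if i < 0:
--             in_dim, stride = 1, 0
--         else:
--             in_dim, stride = in_batch[i], acc
--             acc *= in_dim
--             i -= 1
--         if in_dim == out_dim:
--             res.append(stride)
--         elif in_dim == 1:
--             res.append(0)
--         else:
--             raise ValueError(f"{op_name} batch dimensions are not broadcast-compatible.")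
--     res.reverse()
--     return res
-- ===== Notes on version B (the rewrite author's own statement) =====
-- stated objective: alternative
-- what changed: Replaced the _full_row_major_strides helper and precomputed strides array by a single right-to-left pass over the output batch axes that maintains a running stride accumulator (initialized to the product of the two matrix dims) and builds the result back-to-front before one final reverse.
import Mathlib
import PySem

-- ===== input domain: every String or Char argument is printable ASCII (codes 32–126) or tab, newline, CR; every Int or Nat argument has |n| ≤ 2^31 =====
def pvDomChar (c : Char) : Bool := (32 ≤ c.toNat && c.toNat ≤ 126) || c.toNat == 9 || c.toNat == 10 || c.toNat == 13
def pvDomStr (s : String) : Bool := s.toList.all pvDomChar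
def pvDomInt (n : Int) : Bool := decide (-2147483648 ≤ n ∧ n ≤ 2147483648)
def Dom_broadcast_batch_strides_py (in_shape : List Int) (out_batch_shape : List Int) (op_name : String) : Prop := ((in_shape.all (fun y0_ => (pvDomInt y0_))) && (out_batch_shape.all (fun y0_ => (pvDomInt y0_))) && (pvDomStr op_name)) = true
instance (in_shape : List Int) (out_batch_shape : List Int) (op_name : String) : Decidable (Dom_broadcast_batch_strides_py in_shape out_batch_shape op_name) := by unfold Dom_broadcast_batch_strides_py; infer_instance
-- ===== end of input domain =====

-- B drops the _full_row_major_strides helper: one right-to-left pass over the output batch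
-- axes with a running stride accumulator, building the result back-to-front (alternative
-- decomposition, same cost). Equality of RETURN values is claimed on Pre_ (inputs where A
-- returns normally); where A raises a ValueError both ports return [].

-- ===== PORT A =====
-- loop body of _full_row_major_strides (none = ValueError was raised)
def frms_step (shape : List Int) (st : Option (List Int × Int)) (axis : Int) : Option (List Int × Int) :=
  match st with
  | none => none
  | some (strides, stride) =>
    let dim := PySem.List.pyGetD shape axis 0   -- index always in range in this loop
    if dim ≤ 0 then none
    else some (strides.set axis.toNat stride, stride * dim)

-- literal port of _full_row_major_strides; none = ValueError
def full_row_major_strides (shape : List Int) : Option (List Int) :=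
  let rank : Nat := shape.length
  ((PySem.List.pyRange ((rank : Int) - 1) (-1) (-1)).foldl (frms_step shape)
    (some (List.replicate rank (0 : Int), (1 : Int)))).map Prod.fst

-- loop body of the main loop of A (none = ValueError was raised)
def bbs_A_step (out_batch_shape in_batch in_batch_strides : List Int) (pad : Nat)
    (st : Option (List Int)) (axis : Int) : Option (List Int) :=
  match st with
  | none => none
  | some out =>
    let out_dim := PySem.List.pyGetD out_batch_shape axis 0
    if out_dim ≤ 0 then none
    else
      let p : Int × Int :=
        if axis < (pad : Int) then ((1 : Int), (0 : Int))
        else (PySem.List.pyGetD in_batch (axis - (pad : Int)) 0,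
              PySem.List.pyGetD in_batch_strides (axis - (pad : Int)) 0)
      if p.1 = out_dim then some (out ++ [p.2])
      else if p.1 = 1 then some (out ++ [0])
      else none

def broadcast_batch_strides_py (in_shape : List Int) (out_batch_shape : List Int) (op_name : String) : List Int :=
  let in_batch := PySem.List.slice in_shape none (some (-2))
  let in_rank := in_batch.length
  let out_rank := out_batch_shape.length
  if in_rank > out_rank then []            -- raise ValueError (batch rank mismatch)
  else
    match full_row_major_strides in_shape with
    | none => []                           -- ValueError propagated
    | some full_strides =>
      let in_batch_strides := full_strides.take in_rank
      let pad := out_rank - in_rank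
      match (PySem.List.pyRange 0 (out_rank : Int) 1).foldl
          (bbs_A_step out_batch_shape in_batch in_batch_strides pad)
          (some ([] : List Int)) with
      | none => []                         -- ValueError
      | some out => out

-- ===== PORT B =====
-- the descending for-loop of B, one step per output axis (rightmost first); produces the
-- result in the appended (reversed) order, exactly as B's python list 'res' holds it
def bbs_alt_loop (outRev : List Int) (inRev : List Int) (acc : Int) : Option (List Int) :=
  match outRev, inRev with
  | [], _ => some []
  | od :: orest, [] =>
    if od ≤ 0 then none                    -- raise
    else if (1 : Int) = od then (bbs_alt_loop orest [] acc).map (fun r => (0 : Int) :: r)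
    else (bbs_alt_loop orest [] acc).map (fun r => (0 : Int) :: r)
  | od :: orest, d :: irest =>
    if od ≤ 0 then none                    -- raise
    else if d = od then (bbs_alt_loop orest irest (acc * d)).map (fun r => acc :: r)
    else if d = 1 then (bbs_alt_loop orest irest (acc * d)).map (fun r => (0 : Int) :: r)
    else none                              -- raise (not broadcast-compatible)

def broadcast_batch_strides_py_alt (in_shape : List Int) (out_batch_shape : List Int) (op_name : String) : List Int :=
  let in_batch := PySem.List.slice in_shape none (some (-2))
  if in_batch.length > out_batch_shape.length then []     -- raise
  else if in_shape.any (fun v => decide (v ≤ 0)) then []  -- raise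
  else
    let base := (PySem.List.slice in_shape (some (-2)) none).foldl (· * ·) 1
    match bbs_alt_loop out_batch_shape.reverse in_batch.reverse base with
    | none => []                                          -- raise
    | some revRes => revRes.reverse

-- ===== PRECONDITION & SPEC =====
-- Pre_: exactly the inputs on which the Python A returns normally (batch rank fits, all
-- input dims positive, all output batch dims positive, batch dims broadcast-compatible).
def Pre_broadcast_batch_strides_py (in_shape : List Int) (out_batch_shape : List Int) (op_name : String) : Prop :=
  in_shape.length - 2 ≤ out_batch_shape.length ∧
  (∀ v ∈ in_shape, 0 < v) ∧
  (∀ d ∈ out_batch_shape, 0 < d) ∧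
  (∀ p ∈ (in_shape.take (in_shape.length - 2)).zip
        (out_batch_shape.drop (out_batch_shape.length - (in_shape.length - 2))),
      p.1 = p.2 ∨ p.1 = 1)

instance (in_shape : List Int) (out_batch_shape : List Int) (op_name : String) : Decidable (Pre_broadcast_batch_strides_py in_shape out_batch_shape op_name) := by unfold Pre_broadcast_batch_strides_py; infer_instance

def pvWitness_broadcast_batch_strides_py : List Int × List Int × String := ([2, 1, 4, 5], [3, 2, 6], "MatMul")

def Spec_broadcast_batch_strides_py (in_shape : List Int) (out_batch_shape : List Int) (op_name : String) (out : List Int) : Prop := out = broadcast_batch_strides_py_alt in_shape out_batch_shape op_name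
instance (in_shape : List Int) (out_batch_shape : List Int) (op_name : String) (out : List Int) : Decidable (Spec_broadcast_batch_strides_py in_shape out_batch_shape op_name out) := by unfold Spec_broadcast_batch_strides_py; infer_instance

-- ===== CLAIM (what is proved, stated in full; the proofs are below) =====
def Claim_equal_broadcast_batch_strides_py : Prop := ∀ (in_shape : List Int) (out_batch_shape : List Int) (op_name : String), Dom_broadcast_batch_strides_py in_shape out_batch_shape op_name → Pre_broadcast_batch_strides_py in_shape out_batch_shape op_name → Spec_broadcast_batch_strides_py in_shape out_batch_shape op_name (broadcast_batch_strides_py in_shape out_batch_shape op_name)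

-- ===== LEMMAS AND PROOFS =====

theorem witness_ok : Dom_broadcast_batch_strides_py pvWitness_broadcast_batch_strides_py.1 pvWitness_broadcast_batch_strides_py.2.1 pvWitness_broadcast_batch_strides_py.2.2 ∧ Pre_broadcast_batch_strides_py pvWitness_broadcast_batch_strides_py.1 pvWitness_broadcast_batch_strides_py.2.1 pvWitness_broadcast_batch_strides_py.2.2 := by
  decide

-- the common value both ports produce on the broadcast-matched axes: per axis the stride
-- (product of the input dims to its right, i.e. tail-product times b) or 0
def avals : List Int → List Int → Int → List Int
  | i :: is, o :: os, b => (if i = o then b * is.prod else 0) :: avals is os b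
  | _, _, _ => []

-- ---- A side: characterize _full_row_major_strides ----

theorem frms_loop (s : List Int) (hs : ∀ v ∈ s, 0 < v) :
    ∀ m : Nat, m ≤ s.length →
      (PySem.List.pyRange ((m : Int) - 1) (-1) (-1)).foldl (frms_step s)
        (some ((List.range s.length).map (fun j => if j < m then 0 else (s.drop (j+1)).prod),
               (s.drop m).prod))
      = some ((List.range s.length).map (fun j => (s.drop (j+1)).prod), s.prod) := by
  intro m
  induction m with
  | zero =>
    intro _
    rw [show ((0 : Nat) : Int) - 1 = -1 by norm_num,
      PySem.List.pyRange_neg_one_eq_nil (by norm_num)]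
    simp
  | succ m ih =>
    intro hm
    have hm' : m < s.length := hm
    have hdim : (0 : Int) < s[m] := hs _ (List.getElem_mem hm')
    rw [show ((m + 1 : Nat) : Int) - 1 = ((m : Nat) : Int) by push_cast; ring,
      PySem.List.pyRange_neg_one_cons (by omega), List.foldl_cons]
    have hget : PySem.List.pyGetD s ((m : Nat) : Int) 0 = s[m] := by
      rw [PySem.List.pyGetD_natCast, List.getD_eq_getElem _ _ hm']
    have hset : ((List.range s.length).map
          (fun j => if j < m + 1 then 0 else (s.drop (j+1)).prod)).set m ((s.drop (m+1)).prod)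
        = (List.range s.length).map (fun j => if j < m then 0 else (s.drop (j+1)).prod) := by
      apply List.ext_getElem (by simp)
      intro k hk1 hk2
      simp only [List.length_set, List.length_map, List.length_range] at hk1
      rw [List.getElem_set]
      simp only [List.getElem_map, List.getElem_range]
      by_cases hkm : m = k
      · subst hkm; simp
      · rw [if_neg hkm]
        by_cases hlt : k < m
        · rw [if_pos (by omega), if_pos hlt]
        · rw [if_neg (by omega), if_neg hlt]
    have hprod : (s.drop (m+1)).prod * s[m] = (s.drop m).prod := by
      rw [List.drop_eq_getElem_cons hm', List.prod_cons, mul_comm]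
    have hstep : frms_step s
        (some ((List.range s.length).map (fun j => if j < m + 1 then 0 else (s.drop (j+1)).prod),
               (s.drop (m+1)).prod)) ((m : Nat) : Int)
        = some ((List.range s.length).map (fun j => if j < m then 0 else (s.drop (j+1)).prod),
                (s.drop m).prod) := by
      simp only [frms_step, hget]
      rw [if_neg (by omega), Int.toNat_natCast, hset, hprod]
    rw [hstep]
    exact ih (by omega)

theorem frms_pos (s : List Int) (hs : ∀ v ∈ s, 0 < v) :
    full_row_major_strides s
      = some ((List.range s.length).map (fun j => (s.drop (j+1)).prod)) := by
  have hrepl : (List.range s.length).map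
      (fun j => if j < s.length then 0 else (s.drop (j+1)).prod)
      = List.replicate s.length (0 : Int) := by
    apply List.ext_getElem (by simp)
    intro k hk1 hk2
    simp only [List.length_map, List.length_range] at hk1
    simp only [List.getElem_map, List.getElem_range, List.getElem_replicate]
    rw [if_pos hk1]
  have h := frms_loop s hs s.length le_rfl
  rw [hrepl, show (s.drop s.length).prod = 1 by simp] at h
  simp only [full_row_major_strides]
  rw [h]
  rfl

-- ---- A side: the main loop, padding phase then matched phase ----

theorem A_phase1 (ob ib ibs : List Int) (pad : Nat) (hpad : pad ≤ ob.length)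
    (hpos : ∀ d ∈ ob, 0 < d) :
    ∀ (t j : Nat) (acc : List Int), j + t ≤ pad →
      (PySem.List.pyRange (j : Int) ((j + t : Nat) : Int) 1).foldl
          (bbs_A_step ob ib ibs pad) (some acc)
        = some (acc ++ List.replicate t 0) := by
  intro t
  induction t with
  | zero =>
    intro j acc _
    rw [PySem.List.pyRange_one_eq_nil (by omega)]
    simp
  | succ t ih =>
    intro j acc hjt
    have hj : j < ob.length := by omega
    have hod : (0 : Int) < ob[j] := hpos _ (List.getElem_mem hj)
    rw [PySem.List.pyRange_one_cons (by omega), List.foldl_cons]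
    have hget : PySem.List.pyGetD ob ((j : Nat) : Int) 0 = ob[j] := by
      rw [PySem.List.pyGetD_natCast, List.getD_eq_getElem _ _ hj]
    have hstep : bbs_A_step ob ib ibs pad (some acc) ((j : Nat) : Int) = some (acc ++ [0]) := by
      simp only [bbs_A_step, hget]
      rw [if_neg (by omega), if_pos (show ((j : Nat) : Int) < ((pad : Nat) : Int) by omega)]
      by_cases h1 : (1 : Int) = ob[j]
      · rw [if_pos (by simpa using h1)]
      · rw [if_neg (by simpa using h1), if_pos (by norm_num)]
    rw [hstep,
      show ((j : Nat) : Int) + 1 = (((j + 1 : Nat)) : Int) by push_cast; ring,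
      show ((j + (t + 1) : Nat) : Int) = (((j + 1) + t : Nat) : Int) by push_cast; ring,
      ih (j + 1) (acc ++ [0]) (by omega)]
    simp [List.replicate_succ, List.append_assoc]

theorem A_phase2 (n ob : List Int)
    (hpos_out : ∀ d ∈ ob, 0 < d)
    (hcompat : ∀ p ∈ (n.take (n.length - 2)).zip (ob.drop (ob.length - (n.length - 2))),
        p.1 = p.2 ∨ p.1 = 1)
    (hrank : n.length - 2 ≤ ob.length) :
    ∀ (ib2 : List Int) (t : Nat) (acc : List Int),
      ib2 = (n.take (n.length - 2)).drop t → t ≤ n.length - 2 →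
      (PySem.List.pyRange ((ob.length - (n.length - 2) + t : Nat) : Int) ((ob.length : Nat) : Int) 1).foldl
          (bbs_A_step ob (n.take (n.length - 2))
            ((List.range (n.length - 2)).map (fun j => (n.drop (j+1)).prod))
            (ob.length - (n.length - 2)))
          (some acc)
        = some (acc ++ avals ib2 (ob.drop (ob.length - (n.length - 2) + t))
                        ((n.drop (n.length - 2)).prod)) := by
  intro ib2
  induction ib2 with
  | nil =>
    intro t acc hib ht
    have hlen : (n.take (n.length - 2)).length = n.length - 2 := by simp
    have hte : n.length - 2 ≤ t := by
      have := congrArg List.length hib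
      simp only [List.length_nil, List.length_drop, hlen] at this
      omega
    rw [PySem.List.pyRange_one_eq_nil (by omega)]
    simp [avals]
  | cons i irest ih =>
    intro t acc hib ht
    have hlen_ib : (n.take (n.length - 2)).length = n.length - 2 := by simp
    have hkl : (n.length - 2) - t = irest.length + 1 := by
      have := congrArg List.length hib
      simp only [List.length_cons, List.length_drop, hlen_ib] at this
      omega
    have htlt : t < n.length - 2 := by omega
    have haxis : ob.length - (n.length - 2) + t < ob.length := by omega
    have hib_t : (n.take (n.length - 2))[t]'(by omega) = i := by
      have h0 := congrArg (fun l => l[0]?) hib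
      simp only [List.getElem?_cons_zero, List.getElem?_drop, Nat.add_zero] at h0
      rw [List.getElem?_eq_getElem (by omega)] at h0
      exact (Option.some_inj.mp h0).symm
    have htail : irest = (n.take (n.length - 2)).drop (t + 1) := by
      have h0 := congrArg List.tail hib
      simpa [List.tail_drop] using h0
    have hsplit : n.drop (t + 1) = (n.take (n.length - 2)).drop (t + 1) ++ n.drop (n.length - 2) := by
      conv_lhs => rw [← List.take_append_drop (n.length - 2) n]
      rw [List.drop_append_of_le_length (by simp; omega)]
    have hstride : (n.drop (t + 1)).prod
        = (n.drop (n.length - 2)).prod * irest.prod := by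
      rw [hsplit, List.prod_append, ← htail, mul_comm]
    have hod : (0 : Int) < ob[ob.length - (n.length - 2) + t] :=
      hpos_out _ (List.getElem_mem haxis)
    have hio : i = ob[ob.length - (n.length - 2) + t] ∨ i = 1 := by
      have hzlen : t < ((n.take (n.length - 2)).zip
          (ob.drop (ob.length - (n.length - 2)))).length := by
        simp only [List.length_zip, List.length_drop, hlen_ib]
        omega
      have hz := hcompat _ (List.getElem_mem hzlen)
      rw [List.getElem_zip] at hz
      simpa [hib_t, List.getElem_drop] using hz
    have hodrop : ob.drop (ob.length - (n.length - 2) + t)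
        = ob[ob.length - (n.length - 2) + t] :: ob.drop (ob.length - (n.length - 2) + t + 1) :=
      List.drop_eq_getElem_cons haxis
    rw [PySem.List.pyRange_one_cons (by omega), List.foldl_cons]
    have hget_out : PySem.List.pyGetD ob ((ob.length - (n.length - 2) + t : Nat) : Int) 0
        = ob[ob.length - (n.length - 2) + t] := by
      rw [PySem.List.pyGetD_natCast, List.getD_eq_getElem _ _ haxis]
    have hsub : ((ob.length - (n.length - 2) + t : Nat) : Int)
        - ((ob.length - (n.length - 2) : Nat) : Int) = ((t : Nat) : Int) := by
      push_cast; ring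
    have hget_in : PySem.List.pyGetD (n.take (n.length - 2)) ((t : Nat) : Int) 0 = i := by
      rw [PySem.List.pyGetD_natCast, List.getD_eq_getElem _ _ (by omega), hib_t]
    have hget_str : PySem.List.pyGetD
        ((List.range (n.length - 2)).map (fun j => (n.drop (j+1)).prod)) ((t : Nat) : Int) 0
        = (n.drop (t + 1)).prod := by
      rw [PySem.List.pyGetD_natCast, List.getD_eq_getElem _ _ (by simpa using htlt)]
      simp
    have hstep : bbs_A_step ob (n.take (n.length - 2))
        ((List.range (n.length - 2)).map (fun j => (n.drop (j+1)).prod))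
        (ob.length - (n.length - 2)) (some acc)
        ((ob.length - (n.length - 2) + t : Nat) : Int)
        = some (acc ++ [if i = ob[ob.length - (n.length - 2) + t]
                        then (n.drop (n.length - 2)).prod * irest.prod else 0]) := by
      simp only [bbs_A_step, hget_out]
      rw [if_neg (by omega),
        if_neg (show ¬ ((ob.length - (n.length - 2) + t : Nat) : Int)
            < ((ob.length - (n.length - 2) : Nat) : Int) by omega),
        hsub, hget_in, hget_str]
      by_cases hcase : i = ob[ob.length - (n.length - 2) + t]
      · rw [if_pos (by simpa using hcase), if_pos hcase, hstride]
      · have h1 : i = 1 := hio.resolve_left hcase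
        rw [if_neg (by simpa using hcase), if_pos (by simpa using h1), if_neg hcase]
    rw [hstep,
      show ((ob.length - (n.length - 2) + t : Nat) : Int) + 1
          = ((ob.length - (n.length - 2) + (t + 1) : Nat) : Int) by push_cast; ring,
      ih (t + 1) _ htail (by omega), hodrop]
    simp only [avals]
    rw [List.append_assoc]
    rfl

theorem A_char (n ob : List Int) (op : String)
    (h1 : n.length - 2 ≤ ob.length) (h2 : ∀ v ∈ n, 0 < v) (h3 : ∀ d ∈ ob, 0 < d)
    (h4 : ∀ p ∈ (n.take (n.length - 2)).zip (ob.drop (ob.length - (n.length - 2))),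
        p.1 = p.2 ∨ p.1 = 1) :
    broadcast_batch_strides_py n ob op
      = List.replicate (ob.length - (n.length - 2)) 0
        ++ avals (n.take (n.length - 2)) (ob.drop (ob.length - (n.length - 2)))
                 ((n.drop (n.length - 2)).prod) := by
  have hsl : PySem.List.slice n none (some (-2)) = n.take (n.length - 2) :=
    PySem.List.slice_to_neg_ofNat n 2 (by norm_num)
  have hlen_ib : (n.take (n.length - 2)).length = n.length - 2 := by simp
  have htake : ((List.range n.length).map (fun j => (n.drop (j+1)).prod)).take (n.length - 2)
      = (List.range (n.length - 2)).map (fun j => (n.drop (j+1)).prod) := by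
    rw [← List.map_take, List.take_range, Nat.min_eq_left (Nat.sub_le _ _)]
  have hsplitr : PySem.List.pyRange 0 ((ob.length : Nat) : Int) 1
      = PySem.List.pyRange 0 ((ob.length - (n.length - 2) : Nat) : Int) 1
        ++ PySem.List.pyRange ((ob.length - (n.length - 2) : Nat) : Int) ((ob.length : Nat) : Int) 1 :=
    PySem.List.pyRange_one_append _ _ _ (by exact_mod_cast Nat.zero_le _)
      (by exact_mod_cast Nat.sub_le _ _)
  have hp1 := A_phase1 ob (n.take (n.length - 2))
    ((List.range (n.length - 2)).map (fun j => (n.drop (j+1)).prod))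
    (ob.length - (n.length - 2)) (by omega) h3 (ob.length - (n.length - 2)) 0 [] (by omega)
  simp only [Nat.cast_zero, Nat.zero_add, List.nil_append] at hp1
  have hp2 := A_phase2 n ob h3 h4 h1 (n.take (n.length - 2)) 0
    (List.replicate (ob.length - (n.length - 2)) (0 : Int)) (by simp) (by omega)
  simp only [Nat.add_zero] at hp2
  simp only [broadcast_batch_strides_py, hsl, hlen_ib, frms_pos n h2, htake]
  rw [if_neg (by omega), hsplitr, List.foldl_append, hp1, hp2]

-- ---- B side ----

-- per-axis values of B's loop in its (reversed) traversal order
def bvals : List Int → List Int → Int → List Int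
  | i :: is, o :: os, acc => (if i = o then acc else 0) :: bvals is os (acc * i)
  | _, _, _ => []

theorem B_pad (os : List Int) (acc : Int) (h : ∀ d ∈ os, 0 < d) :
    bbs_alt_loop os [] acc = some (List.replicate os.length 0) := by
  induction os with
  | nil => simp [bbs_alt_loop]
  | cons od orest ih =>
    have hod : 0 < od := h od (by simp)
    rw [bbs_alt_loop, if_neg (by omega)]
    have hrec := ih (fun d hd => h d (by simp [hd]))
    by_cases h1 : (1 : Int) = od <;>
      simp [h1, hrec, List.replicate_succ]

theorem B_match : ∀ (irev orev rest : List Int) (acc : Int),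
    irev.length = orev.length → (∀ d ∈ orev, 0 < d) →
    (∀ p ∈ irev.zip orev, p.1 = p.2 ∨ p.1 = 1) →
    bbs_alt_loop (orev ++ rest) irev acc
      = (bbs_alt_loop rest [] (acc * irev.prod)).map (fun r => bvals irev orev acc ++ r) := by
  intro irev
  induction irev with
  | nil =>
    intro orev rest acc hlen _ _
    have horev : orev = [] := List.eq_nil_of_length_eq_zero (by simpa using hlen.symm)
    subst horev
    simp [bvals, Option.map_id']
  | cons d irest ih =>
    intro orev rest acc hlen hpos hcomp
    match orev with
    | [] => simp at hlen
    | od :: orest' =>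
      have hod : 0 < od := hpos od (by simp)
      have hd : d = od ∨ d = 1 := by
        have := hcomp (d, od) (by simp)
        simpa using this
      rw [List.cons_append, bbs_alt_loop, if_neg (by omega)]
      have hrec := ih orest' rest (acc * d) (by simpa using hlen)
        (fun x hx => hpos x (by simp [hx])) (fun p hp => hcomp p (by simp [hp]))
      by_cases hdo : d = od
      · rw [if_pos hdo, hrec]
        simp [bvals, hdo, Option.map_map, Function.comp_def, mul_assoc]
      · have hd1 : d = 1 := hd.resolve_left hdo
        rw [if_neg hdo, if_pos hd1, hrec]
        simp [bvals, hdo, Option.map_map, Function.comp_def, mul_assoc]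

theorem bvals_append : ∀ (xs ys : List Int) (i o acc : Int), xs.length = ys.length →
    bvals (xs ++ [i]) (ys ++ [o]) acc
      = bvals xs ys acc ++ [if i = o then acc * xs.prod else 0] := by
  intro xs
  induction xs with
  | nil =>
    intro ys i o acc hlen
    have : ys = [] := List.eq_nil_of_length_eq_zero (by simpa using hlen.symm)
    subst this
    simp [bvals]
  | cons x xs' ih =>
    intro ys i o acc hlen
    match ys with
    | [] => simp at hlen
    | y :: ys' =>
      rw [List.cons_append, List.cons_append, bvals, ih ys' i o (acc * x) (by simpa using hlen)]
      simp [bvals, mul_assoc]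

theorem bvals_reverse : ∀ (ib ob : List Int) (acc : Int), ib.length = ob.length →
    (bvals ib.reverse ob.reverse acc).reverse = avals ib ob acc := by
  intro ib
  induction ib with
  | nil =>
    intro ob acc hlen
    have : ob = [] := List.eq_nil_of_length_eq_zero (by simpa using hlen.symm)
    subst this
    simp [bvals, avals]
  | cons i is ih =>
    intro ob acc hlen
    match ob with
    | [] => simp at hlen
    | o :: os =>
      rw [List.reverse_cons, List.reverse_cons,
          bvals_append is.reverse os.reverse i o acc (by simpa using hlen),
          List.reverse_append]
      simp [avals, List.prod_reverse, ih os acc (by simpa using hlen)]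

theorem zip_reverse {A B : Type} (a : List A) (b : List B) (h : a.length = b.length) :
    a.reverse.zip b.reverse = (a.zip b).reverse := by
  induction a generalizing b with
  | nil =>
    have : b = [] := List.eq_nil_of_length_eq_zero (by simpa using h.symm)
    subst this; simp
  | cons x xs ih =>
    match b with
    | [] => simp at h
    | y :: ys =>
      simp only [List.reverse_cons]
      rw [List.zip_append (by simpa using h), ih ys (by simpa using h)]
      simp

theorem B_char (n ob : List Int) (op : String)
    (h1 : n.length - 2 ≤ ob.length) (h2 : ∀ v ∈ n, 0 < v) (h3 : ∀ d ∈ ob, 0 < d)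
    (h4 : ∀ p ∈ (n.take (n.length - 2)).zip (ob.drop (ob.length - (n.length - 2))),
        p.1 = p.2 ∨ p.1 = 1) :
    broadcast_batch_strides_py_alt n ob op
      = List.replicate (ob.length - (n.length - 2)) 0
        ++ avals (n.take (n.length - 2)) (ob.drop (ob.length - (n.length - 2)))
                 ((n.drop (n.length - 2)).prod) := by
  have hsl : PySem.List.slice n none (some (-2)) = n.take (n.length - 2) :=
    PySem.List.slice_to_neg_ofNat n 2 (by norm_num)
  have hsl2 : PySem.List.slice n (some (-2)) none = n.drop (n.length - 2) :=
    PySem.List.slice_from_neg_ofNat n 2 (by norm_num)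
  have hlen_ib : (n.take (n.length - 2)).length = n.length - 2 := by
    simp [List.length_take]
  have hany : n.any (fun v => decide (v ≤ 0)) = false := by
    simp only [List.any_eq_false, decide_eq_true_eq]
    intro x hx
    have := h2 x hx; omega
  have hbase : (n.drop (n.length - 2)).foldl (· * ·) 1 = (n.drop (n.length - 2)).prod :=
    List.prod_eq_foldl.symm
  have hobrev : ob.reverse
      = (ob.drop (ob.length - (n.length - 2))).reverse
        ++ (ob.take (ob.length - (n.length - 2))).reverse := by
    rw [← List.reverse_append, List.take_append_drop]
  have hlen2 : (n.take (n.length - 2)).reverse.length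
      = ((ob.drop (ob.length - (n.length - 2))).reverse).length := by
    simp only [List.length_reverse, List.length_drop, hlen_ib]; omega
  have hposrev : ∀ d ∈ (ob.drop (ob.length - (n.length - 2))).reverse, 0 < d :=
    fun d hd => h3 d (List.mem_of_mem_drop (List.mem_reverse.mp hd))
  have hcomprev : ∀ p ∈ (n.take (n.length - 2)).reverse.zip
      ((ob.drop (ob.length - (n.length - 2))).reverse), p.1 = p.2 ∨ p.1 = 1 := by
    intro p hp
    apply h4
    have hz : (n.take (n.length - 2)).length
        = (ob.drop (ob.length - (n.length - 2))).length := by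
      simp only [List.length_drop, hlen_ib]; omega
    rw [zip_reverse _ _ hz] at hp
    exact List.mem_reverse.mp hp
  have hpostake : ∀ d ∈ (ob.take (ob.length - (n.length - 2))).reverse, 0 < d :=
    fun d hd => h3 d (List.mem_of_mem_take (List.mem_reverse.mp hd))
  simp only [broadcast_batch_strides_py_alt, hsl, hsl2, hany, Bool.false_eq_true, if_false,
    hbase]
  rw [if_neg (by simp [hlen_ib]; omega)]
  rw [hobrev, B_match _ _ _ _ hlen2 hposrev hcomprev, B_pad _ _ hpostake]
  simp only [Option.map_some]
  rw [List.reverse_append, bvals_reverse _ _ _ (by simp [hlen_ib]; omega)]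
  have hpadlen : (ob.take (ob.length - (n.length - 2))).reverse.length
      = ob.length - (n.length - 2) := by simp
  rw [hpadlen, List.reverse_replicate]

-- ===== VERDICT (by name: the statement is the Claim_ definition above) =====
theorem broadcast_batch_strides_py_spec : Claim_equal_broadcast_batch_strides_py := by
  intro n ob op _hdom hpre
  obtain ⟨h1, h2, h3, h4⟩ := hpre
  unfold Spec_broadcast_batch_strides_py
  rw [A_char n ob op h1 h2 h3 h4, B_char n ob op h1 h2 h3 h4]
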